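-- pv_equiv track=rewrite | github.com/Prix4Houdini/Capstone-Project | src/tree_support.py | constituent_gates
-- ===== SOURCE A (Python) =====
-- def constituent_gates(n : int) -> list:
--     '''returns a list of constituent gates as the number of inputs they have'''
--     #invalid input
--     if type(n) is not int:
--         raise TypeError("only integer inputs are accepted.")
--     elif(n <= 0):
--         raise ValueError("input cannot be less than or equal to zero.")
--     #valid input
--     a = 1
--     l = []
--     while(n != 0):
--         if(n&1):    # if the LSB is 1
--             l.append(a)
--         a *= 2      # increase the power of two to match
--                     # value of bit being examined
--         n = n>>1        # left shift to examine next bit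
--     return l
-- ===== SOURCE B (Python) =====
-- def constituent_gates(n : int) -> list:
--     '''returns a list of constituent gates as the number of inputs they have'''
--     if type(n) is not int:
--         raise TypeError("only integer inputs are accepted.")
--     elif n <= 0:
--         raise ValueError("input cannot be less than or equal to zero.")
--     l = []
--     while n:
--         m = n & (n - 1)     # clear the lowest set bit
--         l.append(n - m)     # the lowest set bit itself, a power of two
--         n = m
--     return l
-- ===== Notes on version B (the rewrite author's own statement) =====
-- stated objective: alternative
-- what changed: Instead of scanning every bit position with a power-of-two accumulator and a right shift, B extracts the lowest set bit directly (m = n & (n-1), append n - m), iterating once per set bit instead of once per bit position.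
import Mathlib
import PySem

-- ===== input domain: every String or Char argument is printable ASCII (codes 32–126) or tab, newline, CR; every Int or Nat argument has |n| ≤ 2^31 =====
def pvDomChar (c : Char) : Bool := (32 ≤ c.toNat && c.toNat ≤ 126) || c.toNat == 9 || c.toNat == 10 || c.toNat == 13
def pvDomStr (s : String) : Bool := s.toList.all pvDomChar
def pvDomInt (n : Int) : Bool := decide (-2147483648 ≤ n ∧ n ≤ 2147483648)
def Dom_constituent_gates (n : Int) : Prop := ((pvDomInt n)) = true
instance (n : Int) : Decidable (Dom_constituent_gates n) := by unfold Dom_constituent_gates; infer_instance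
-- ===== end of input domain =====

-- B replaces A's scan over every bit position (power accumulator + shift) by
-- clearing the lowest set bit each iteration (m = n & (n-1), append n - m),
-- so the loop runs once per SET bit only.  Equivalence proved for n > 0
-- (Pre_); for n ≤ 0 both Pythons raise.

-- ===== PORT A =====
-- A's while loop: state (a, n, l); n is positive after the guard, so tracked as Nat.
def goA (a : Int) (n : Nat) (l : List Int) : List Int :=
  if h : n = 0 then l
  else goA (a * 2) (n / 2) (if n % 2 = 1 then l ++ [a] else l)
termination_by n
decreasing_by exact Nat.div_lt_self (Nat.pos_of_ne_zero h) one_lt_two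

def constituent_gates (n : Int) : List Int :=
  if n ≤ 0 then []   -- Python raises ValueError here (excluded by Pre_)
  else goA 1 n.toNat []

-- ===== PORT B =====
-- B's while loop: m = n & (n-1) clears the lowest set bit, n - m is that bit.
def goB (n : Nat) (l : List Int) : List Int :=
  if h : n = 0 then l
  else goB (n &&& (n - 1)) (l ++ [((n - (n &&& (n - 1)) : Nat) : Int)])
termination_by n
decreasing_by
  have hle : n &&& (n - 1) ≤ n - 1 := Nat.and_le_right
  omega

def constituent_gates_alt (n : Int) : List Int :=
  if n ≤ 0 then []   -- Python raises ValueError here (excluded by Pre_)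
  else goB n.toNat []

-- ===== PRECONDITION & SPEC =====
-- Pre_: the Python raises TypeError/ValueError exactly when n ≤ 0.
def Pre_constituent_gates (n : Int) : Prop := 0 < n
instance (n : Int) : Decidable (Pre_constituent_gates n) := by unfold Pre_constituent_gates; infer_instance
def pvWitness_constituent_gates : Int := (13)

def Spec_constituent_gates (n : Int) (out : List Int) : Prop := out = constituent_gates_alt n
instance (n : Int) (out : List Int) : Decidable (Spec_constituent_gates n out) := by unfold Spec_constituent_gates; infer_instance

-- ===== CLAIM (what is proved, stated in full; the proofs are below) =====
def Claim_equal_constituent_gates : Prop := ∀ (n : Int), Dom_constituent_gates n → Pre_constituent_gates n → Spec_constituent_gates n (constituent_gates n)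

-- ===== LEMMAS AND PROOFS =====

-- Accumulator-free versions of the two loops.
def pureA (a : Int) (n : Nat) : List Int :=
  if h : n = 0 then []
  else (if n % 2 = 1 then [a] else []) ++ pureA (a * 2) (n / 2)
termination_by n
decreasing_by exact Nat.div_lt_self (Nat.pos_of_ne_zero h) one_lt_two

def pureB (n : Nat) : List Int :=
  if h : n = 0 then []
  else ((n - (n &&& (n - 1)) : Nat) : Int) :: pureB (n &&& (n - 1))
termination_by n
decreasing_by
  have hle : n &&& (n - 1) ≤ n - 1 := Nat.and_le_right
  omega

theorem goA_eq (a : Int) (n : Nat) (l : List Int) : goA a n l = l ++ pureA a n := by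
  induction a, n, l using goA.induct with
  | case1 a l => simp [goA, pureA]
  | case2 a n l h ih =>
      rw [goA, pureA]
      simp only [h, dite_false]
      by_cases hp : n % 2 = 1 <;>
        simp only [hp, if_true, if_false, dite_true, dite_false] at ih ⊢ <;>
        simp [ih]

theorem goB_eq (n : Nat) (l : List Int) : goB n l = l ++ pureB n := by
  induction n, l using goB.induct with
  | case1 l => simp [goB, pureB]
  | case2 n l h ih =>
      rw [goB, pureB.eq_def]
      simp [h, ih]

theorem land_two_mul_odd (a b : Nat) : (2 * a) &&& (2 * b + 1) = 2 * (a &&& b) := by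
  apply Nat.eq_of_testBit_eq
  intro i
  cases i with
  | zero => simp [Nat.testBit_zero, Nat.mul_mod_right]
  | succ j => simp [Nat.testBit_succ, Nat.and_div_two, Nat.mul_add_div]

theorem land_odd_two_mul (a b : Nat) : (2 * a + 1) &&& (2 * b) = 2 * (a &&& b) := by
  apply Nat.eq_of_testBit_eq
  intro i
  cases i with
  | zero => simp [Nat.testBit_zero, Nat.mul_mod_right]
  | succ j => simp [Nat.testBit_succ, Nat.and_div_two, Nat.mul_add_div]

theorem land_self' (a : Nat) : a &&& a = a := by
  apply Nat.eq_of_testBit_eq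
  intro i
  simp

theorem land_pred_odd (n : Nat) (h : n % 2 = 1) : n &&& (n - 1) = n - 1 := by
  obtain ⟨j, rfl⟩ : ∃ j, n = 2 * j + 1 := ⟨n / 2, by omega⟩
  have h2 : 2 * j + 1 - 1 = 2 * j := by omega
  rw [h2, land_odd_two_mul, land_self']

theorem land_pred_two_mul (k : Nat) (h : k ≠ 0) :
    (2 * k) &&& (2 * k - 1) = 2 * (k &&& (k - 1)) := by
  have h2 : 2 * k - 1 = 2 * (k - 1) + 1 := by omega
  rw [h2, land_two_mul_odd]

theorem pureB_two_mul (k : Nat) : pureB (2 * k) = (pureB k).map (fun x => 2 * x) := by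
  induction k using Nat.strong_induction_on with
  | _ k ih =>
    by_cases h : k = 0
    · simp [h, pureB]
    · have hm : k &&& (k - 1) ≤ k - 1 := Nat.and_le_right
      have h2 : (2 * k) &&& (2 * k - 1) = 2 * (k &&& (k - 1)) := land_pred_two_mul k h
      rw [pureB.eq_def]
      simp only [show ¬(2 * k = 0) by omega, dite_false, h2]
      rw [ih (k &&& (k - 1)) (by omega)]
      conv_rhs => rw [pureB.eq_def]
      simp only [h, dite_false, List.map_cons]
      congr 1
      have h3 : ((2 * k - 2 * (k &&& (k - 1)) : Nat) : Int)
          = 2 * ((k - (k &&& (k - 1)) : Nat) : Int) := by omega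
      exact h3

theorem pureA_eq (n : Nat) : ∀ a : Int, pureA a n = (pureB n).map (fun x => a * x) := by
  induction n using Nat.strong_induction_on with
  | _ n ih =>
    intro a
    by_cases h : n = 0
    · simp [h, pureA, pureB]
    · have hhalf : n / 2 < n := Nat.div_lt_self (Nat.pos_of_ne_zero h) one_lt_two
      rw [pureA]
      simp only [h, dite_false]
      by_cases hp : n % 2 = 1
      · -- odd case: the lowest set bit is 1
        have h1 : n &&& (n - 1) = n - 1 := land_pred_odd n hp
        have h2 : n - 1 = 2 * (n / 2) := by omega
        have h3 : ((n - (n - 1) : Nat) : Int) = 1 := by omega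
        have hB : pureB n = 1 :: (pureB (n / 2)).map (fun x => 2 * x) := by
          rw [pureB.eq_def]
          simp only [h, dite_false, h1, h3]
          rw [h2, pureB_two_mul]
        rw [hB, ih (n / 2) hhalf (a * 2)]
        simp only [hp, if_true, List.map_cons, List.map_map, mul_one,
          List.singleton_append]
        congr 1
        apply List.map_congr_left
        intro x _
        simp only [Function.comp_apply]
        ring
      · -- even case: n = 2 * (n / 2)
        have h2 : n = 2 * (n / 2) := by omega
        have hB : pureB n = (pureB (n / 2)).map (fun x => 2 * x) := by
          conv_lhs => rw [h2]
          rw [pureB_two_mul]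
        rw [hB, ih (n / 2) hhalf (a * 2)]
        simp only [hp, if_false, List.nil_append, List.map_map]
        apply List.map_congr_left
        intro x _
        simp only [Function.comp_apply]
        ring

-- ===== VERDICT (by name: the statement is the Claim_ definition above) =====
theorem constituent_gates_spec : Claim_equal_constituent_gates := by
  intro n _ hpre
  unfold Spec_constituent_gates constituent_gates constituent_gates_alt
  have hn : ¬ n ≤ 0 := by exact not_le.mpr hpre
  simp only [hn, if_false]
  rw [goA_eq, goB_eq, pureA_eq]
  simp
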